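-- pv_equiv track=rewrite | github.com/gizemhayan/Skillab | esco_extractor.py | _classify_uris
-- ===== SOURCE A (Python) =====
-- def _classify_uris(
--     uris: list[str],
--     digital_uris: set[str],
--     green_uris: set[str],
--     uri_to_label: dict[str, str],
-- ) -> tuple[list[str], list[str], list[str], list[str]]:
--     """Partition ESCO URIs into all / digital / green / general label lists."""
--     all_labels: list[str] = []
--     digital_labels: list[str] = []
--     green_labels: list[str] = []
--     general_labels: list[str] = []
--     seen: set[str] = set()
--
--     for uri in uris:
--         uri = uri.strip()
--         if uri in seen:
--             continue
--         seen.add(uri)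
--         label = uri_to_label.get(uri, uri)
--         all_labels.append(label)
--         if uri in digital_uris:
--             digital_labels.append(label)
--         elif uri in green_uris:
--             green_labels.append(label)
--         else:
--             general_labels.append(label)
--
--     return all_labels, digital_labels, green_labels, general_labels
-- ===== SOURCE B (Python) =====
-- def _classify_uris(
--     uris: list[str],
--     digital_uris: set[str],
--     green_uris: set[str],
--     uri_to_label: dict[str, str],
-- ) -> tuple[list[str], list[str], list[str], list[str]]:
--     """Partition ESCO URIs into all / digital / green / general label lists."""
--     deduped = list(dict.fromkeys(u.strip() for u in uris))
--
--     def lab(u: str) -> str: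
--         return uri_to_label.get(u, u)
--
--     all_labels = [lab(u) for u in deduped]
--     digital_labels = [lab(u) for u in deduped if u in digital_uris]
--     green_labels = [lab(u) for u in deduped if u not in digital_uris and u in green_uris]
--     general_labels = [lab(u) for u in deduped if u not in digital_uris and u not in green_uris]
--     return all_labels, digital_labels, green_labels, general_labels
-- ===== Notes on version B (the rewrite author's own statement) =====
-- stated objective: alternative
-- what changed: Replaces A's single loop that threads five accumulators and a mutable seen-set with a dict.fromkeys order-preserving dedup followed by four independent comprehension passes (the elif priority becomes explicit exclusion predicates).
import Mathlib
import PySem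

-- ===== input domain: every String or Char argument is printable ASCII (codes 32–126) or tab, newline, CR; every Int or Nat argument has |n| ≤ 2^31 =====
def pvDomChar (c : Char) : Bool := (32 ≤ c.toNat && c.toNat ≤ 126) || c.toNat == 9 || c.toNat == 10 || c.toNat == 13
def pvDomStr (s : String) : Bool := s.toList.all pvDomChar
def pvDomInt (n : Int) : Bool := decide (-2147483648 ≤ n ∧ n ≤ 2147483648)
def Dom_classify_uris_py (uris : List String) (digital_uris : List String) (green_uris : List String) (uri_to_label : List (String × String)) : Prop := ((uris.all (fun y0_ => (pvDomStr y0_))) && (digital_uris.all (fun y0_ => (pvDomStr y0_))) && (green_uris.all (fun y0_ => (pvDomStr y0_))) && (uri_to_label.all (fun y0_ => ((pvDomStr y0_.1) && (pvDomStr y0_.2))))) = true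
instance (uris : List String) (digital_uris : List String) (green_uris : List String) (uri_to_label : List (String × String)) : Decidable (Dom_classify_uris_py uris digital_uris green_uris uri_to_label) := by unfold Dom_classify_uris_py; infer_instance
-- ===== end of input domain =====

-- B replaces A's one loop with five accumulators by dedup-then-four-passes; alternative decomposition, same cost.

-- ===== PORT A =====
-- one loop, state = (all, digital, green, general, seen)
def classify_uris_py (uris : List String) (digital_uris : List String) (green_uris : List String) (uri_to_label : List (String × String)) : List String × List String × List String × List String :=
  let st := uris.foldl
    (fun (st : List String × List String × List String × List String × PySem.Set String) uri0 =>
      let uri := PySem.Str.strip uri0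
      if PySem.Set.contains st.2.2.2.2 uri then st
      else
        let seen := PySem.Set.add st.2.2.2.2 uri
        let label := PySem.Dict.getD (PySem.Dict.mk uri_to_label) uri uri
        let all := st.1 ++ [label]
        if digital_uris.contains uri then (all, st.2.1 ++ [label], st.2.2.1, st.2.2.2.1, seen)
        else if green_uris.contains uri then (all, st.2.1, st.2.2.1 ++ [label], st.2.2.2.1, seen)
        else (all, st.2.1, st.2.2.1, st.2.2.2.1 ++ [label], seen))
    ([], [], [], [], PySem.Set.empty)
  (st.1, st.2.1, st.2.2.1, st.2.2.2.1)

-- ===== PORT B =====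
-- list(dict.fromkeys(u.strip() for u in uris)) = PySem.List.dedup, then four comprehensions
def classify_uris_py_alt (uris : List String) (digital_uris : List String) (green_uris : List String) (uri_to_label : List (String × String)) : List String × List String × List String × List String :=
  let deduped := PySem.List.dedup (uris.map (fun u => PySem.Str.strip u))
  let lab := fun (u : String) => PySem.Dict.getD (PySem.Dict.mk uri_to_label) u u
  ( deduped.map lab,
    (deduped.filter (fun u => digital_uris.contains u)).map lab,
    (deduped.filter (fun u => !digital_uris.contains u && green_uris.contains u)).map lab,
    (deduped.filter (fun u => !digital_uris.contains u && !green_uris.contains u)).map lab )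

-- ===== PRECONDITION & SPEC =====
def Spec_classify_uris_py (uris : List String) (digital_uris : List String) (green_uris : List String) (uri_to_label : List (String × String)) (out : List String × List String × List String × List String) : Prop := out = classify_uris_py_alt uris digital_uris green_uris uri_to_label
instance (uris : List String) (digital_uris : List String) (green_uris : List String) (uri_to_label : List (String × String)) (out : List String × List String × List String × List String) : Decidable (Spec_classify_uris_py uris digital_uris green_uris uri_to_label out) := by unfold Spec_classify_uris_py; infer_instance

-- ===== CLAIM (what is proved, stated in full; the proofs are below) =====
def Claim_equal_classify_uris_py : Prop := ∀ (uris : List String) (digital_uris : List String) (green_uris : List String) (uri_to_label : List (String × String)), Dom_classify_uris_py uris digital_uris green_uris uri_to_label → Spec_classify_uris_py uris digital_uris green_uris uri_to_label (classify_uris_py uris digital_uris green_uris uri_to_label)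

-- ===== LEMMAS AND PROOFS =====

theorem filter_discard (s : List String) (x : String) (p : String → Bool) :
    (PySem.Set.discard s x).filter p = s.filter (fun y => p y && !(y == x)) := by
  simp [PySem.Set.discard, List.filter_filter]

theorem classify_uris_py_loop
    (digital_uris green_uris : List String) (uri_to_label : List (String × String))
    (uris : List String) :
    ∀ (al dl gl ge : List String) (seen : PySem.Set String),
      (uris.foldl
        (fun (st : List String × List String × List String × List String × PySem.Set String) uri0 =>
          let uri := PySem.Str.strip uri0
          if PySem.Set.contains st.2.2.2.2 uri then st
          else
            let seen := PySem.Set.add st.2.2.2.2 uri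
            let label := PySem.Dict.getD (PySem.Dict.mk uri_to_label) uri uri
            let all := st.1 ++ [label]
            if digital_uris.contains uri then (all, st.2.1 ++ [label], st.2.2.1, st.2.2.2.1, seen)
            else if green_uris.contains uri then (all, st.2.1, st.2.2.1 ++ [label], st.2.2.2.1, seen)
            else (all, st.2.1, st.2.2.1, st.2.2.2.1 ++ [label], seen))
        (al, dl, gl, ge, seen)) =
      (let d := (PySem.List.dedup (uris.map (fun u => PySem.Str.strip u))).filter
                  (fun y => !(PySem.Set.contains seen y))
       let lab := fun (u : String) => PySem.Dict.getD (PySem.Dict.mk uri_to_label) u u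
       ( al ++ d.map lab,
         dl ++ ((d.filter (fun u => digital_uris.contains u)).map lab),
         gl ++ ((d.filter (fun u => !digital_uris.contains u && green_uris.contains u)).map lab),
         ge ++ ((d.filter (fun u => !digital_uris.contains u && !green_uris.contains u)).map lab),
         PySem.Set.update seen (uris.map (fun u => PySem.Str.strip u)) )) := by
  induction uris with
  | nil =>
      intro al dl gl ge seen
      simp [PySem.Set.update]
  | cons u0 rest ih =>
      intro al dl gl ge seen
      simp only [List.foldl_cons, List.map_cons]
      by_cases hx : PySem.Set.contains seen (PySem.Str.strip u0) = true
      · -- already seen: the step is the identity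
        have hx' : PySem.Str.strip u0 ∈ seen := by simpa using hx
        simp only [hx, if_true]
        rw [ih al dl gl ge seen]
        have hadd : PySem.Set.add seen (PySem.Str.strip u0) = seen := by
          unfold PySem.Set.add
          rw [if_pos hx]
        have hd : (PySem.List.dedup (PySem.Str.strip u0 :: rest.map (fun u => PySem.Str.strip u))).filter
              (fun y => !(PySem.Set.contains seen y)) =
            (PySem.List.dedup (rest.map (fun u => PySem.Str.strip u))).filter
              (fun y => !(PySem.Set.contains seen y)) := by
          rw [PySem.List.dedup_eq_ofList, PySem.List.dedup_eq_ofList, PySem.Set.ofList_cons,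
            List.filter_cons, filter_discard]
          rw [show (!PySem.Set.contains seen (PySem.Str.strip u0)) = false by simp [hx']]
          simp only [Bool.false_eq_true, if_false]
          apply List.filter_congr
          intro y _
          by_cases hy : y = PySem.Str.strip u0
          · subst hy; simp [hx']
          · simp [hy]
        rw [hd, PySem.Set.update_cons, hadd]
      · -- new uri
        rw [Bool.not_eq_true] at hx
        have hx' : PySem.Str.strip u0 ∉ seen := by simpa using hx
        have hd : (PySem.List.dedup (PySem.Str.strip u0 :: rest.map (fun u => PySem.Str.strip u))).filter
              (fun y => !(PySem.Set.contains seen y)) =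
            PySem.Str.strip u0 ::
              (PySem.List.dedup (rest.map (fun u => PySem.Str.strip u))).filter
                (fun y => !(PySem.Set.contains (PySem.Set.add seen (PySem.Str.strip u0)) y)) := by
          rw [PySem.List.dedup_eq_ofList, PySem.List.dedup_eq_ofList, PySem.Set.ofList_cons,
            List.filter_cons, filter_discard]
          rw [show (!PySem.Set.contains seen (PySem.Str.strip u0)) = true by simp [hx']]
          simp only [if_true]
          congr 1
          apply List.filter_congr
          intro y _
          simp [Bool.not_or, beq_eq_decide]
        simp only [hx, Bool.false_eq_true, if_false]
        by_cases hdig : digital_uris.contains (PySem.Str.strip u0) = true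
        · have hdig' : PySem.Str.strip u0 ∈ digital_uris := by simpa using hdig
          simp only [hdig, if_true]
          rw [ih, hd]
          simp [hdig', PySem.Set.update_cons, hx']
        · rw [Bool.not_eq_true] at hdig
          have hdig' : PySem.Str.strip u0 ∉ digital_uris := by simpa using hdig
          simp only [hdig, Bool.false_eq_true, if_false]
          by_cases hgrn : green_uris.contains (PySem.Str.strip u0) = true
          · have hgrn' : PySem.Str.strip u0 ∈ green_uris := by simpa using hgrn
            simp only [hgrn, if_true]
            rw [ih, hd]
            simp [hdig', hgrn', PySem.Set.update_cons, hx']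
          · rw [Bool.not_eq_true] at hgrn
            have hgrn' : PySem.Str.strip u0 ∉ green_uris := by simpa using hgrn
            simp only [hgrn, Bool.false_eq_true, if_false]
            rw [ih, hd]
            simp [hdig', hgrn', PySem.Set.update_cons, hx']

-- ===== VERDICT (by name: the statement is the Claim_ definition above) =====
theorem classify_uris_py_spec : Claim_equal_classify_uris_py := by
  intro uris digital_uris green_uris uri_to_label _
  unfold Spec_classify_uris_py classify_uris_py classify_uris_py_alt
  rw [classify_uris_py_loop]
  simp [PySem.Set.empty]
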